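-- pv_equiv track=rewrite | github.com/marcosavion/munics-master | SI/Lab3/Lab3_MarcosVillar.py | calculateParentById
-- ===== SOURCE A (Python) =====
-- import math
--
-- def calculateParentById(id: int) -> list:
--     '''
--     Recursive method.
--     This method returns all the id parents of a particular id
--     '''
--
--     list_of_parents = list()
--
--     if(id!=1):
--         id_parent = math.floor(id/2)
--         list_of_parents = [id] + calculateParentById(id_parent)
--     else:
--         list_of_parents.append(id)
--
--     return list_of_parents
-- ===== SOURCE B (Python) =====
-- def calculateParentById(id: int) -> list:
--     # closed form: the chain is id shifted right by 0,1,...,bit_length-1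
--     return [id >> s for s in range(id.bit_length())]
-- ===== Notes on version B (the rewrite author's own statement) =====
-- stated objective: alternative
-- what changed: Replaced the recursion by a closed form: a list comprehension shifting id right by 0..bit_length-1, with no sequential halving state.
-- outside the precondition, e.g. on calculateParentById(0): A raises RecursionError, B returns []
import Mathlib
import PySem

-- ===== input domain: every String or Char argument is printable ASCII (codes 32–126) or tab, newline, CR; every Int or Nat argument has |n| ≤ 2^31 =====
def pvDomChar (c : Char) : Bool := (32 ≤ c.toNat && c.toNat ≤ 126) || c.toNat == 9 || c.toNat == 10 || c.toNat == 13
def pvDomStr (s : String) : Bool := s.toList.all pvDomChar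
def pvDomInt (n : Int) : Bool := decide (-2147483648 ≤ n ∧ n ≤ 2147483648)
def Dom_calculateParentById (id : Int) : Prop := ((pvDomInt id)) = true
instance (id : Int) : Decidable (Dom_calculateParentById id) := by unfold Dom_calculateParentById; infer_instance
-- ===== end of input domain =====

-- B replaces A's recursion by a closed form: the chain is [id >> s for s in range(id.bit_length())] (alternative decomposition, same cost).


-- ===== PORT A =====
-- math.floor(id/2) = PySem.Int.floordiv id 2 exactly on |id| ≤ 2^31 (float division is exact there).
-- The 'id ≤ 0' guard only makes the recursion total; A raises RecursionError there (outside Pre_).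
def calculateParentById (id : Int) : List Int :=
  if id ≠ 1 then
    if _h : id ≤ 0 then []
    else id :: calculateParentById (PySem.Int.floordiv id 2)
  else [id]
termination_by id.toNat
decreasing_by
  have := PySem.Int.floordiv_eq_ediv_of_pos (a := id) (b := 2) (by omega)
  omega

-- ===== PORT B =====
-- Source B's comprehension: id.bit_length() = PySem.Int.bitLength, Python's id >> s = Lean's id >>> s.
def calculateParentById_alt (id : Int) : List Int :=
  (PySem.List.pyRange 0 (PySem.Int.bitLength id : Int) 1).map (fun s => id >>> s.toNat)

-- ===== PRECONDITION & SPEC =====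
-- Pre_ excludes id ≤ 0, where Python A raises RecursionError.
def Pre_calculateParentById (id : Int) : Prop := 1 ≤ id
instance (id : Int) : Decidable (Pre_calculateParentById id) := by unfold Pre_calculateParentById; infer_instance
def pvWitness_calculateParentById : Int := 13

def Spec_calculateParentById (id : Int) (out : List Int) : Prop := out = calculateParentById_alt id
instance (id : Int) (out : List Int) : Decidable (Spec_calculateParentById id out) := by unfold Spec_calculateParentById; infer_instance

-- ===== CLAIM (what is proved, stated in full; the proofs are below) =====
def Claim_equal_calculateParentById : Prop := ∀ (id : Int), Dom_calculateParentById id → Pre_calculateParentById id → Spec_calculateParentById id (calculateParentById id)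

-- ===== LEMMAS AND PROOFS =====

-- the fuel of bitLengthAux is irrelevant as long as it dominates the argument
theorem pvBitLengthAux_fuel (f₁ : Nat) : ∀ (f₂ n : Nat), n < f₁ → n < f₂ →
    PySem.Int.bitLengthAux f₁ n = PySem.Int.bitLengthAux f₂ n := by
  induction f₁ with
  | zero => intro f₂ n h; omega
  | succ f ih =>
    intro f₂ n h1 h2
    cases f₂ with
    | zero => omega
    | succ g =>
      simp only [PySem.Int.bitLengthAux]
      by_cases hn : n = 0
      · simp [hn]
      · simp only [hn, if_false]
        rw [ih g (n / 2) (by omega) (by omega)]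

theorem pvBitLength_step (n : Int) (h : 2 ≤ n) :
    PySem.Int.bitLength n = PySem.Int.bitLength (n / 2) + 1 := by
  have hm : n.natAbs ≠ 0 := by omega
  have habs : (n / 2).natAbs = n.natAbs / 2 := by omega
  show PySem.Int.bitLengthAux (n.natAbs + 1) n.natAbs
      = PySem.Int.bitLengthAux ((n / 2).natAbs + 1) (n / 2).natAbs + 1
  conv_lhs => rw [PySem.Int.bitLengthAux]
  simp only [hm, if_false, habs]
  rw [pvBitLengthAux_fuel n.natAbs (n.natAbs / 2 + 1) (n.natAbs / 2) (by omega) (by omega)]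

-- closed-form characterisation of A's chain
theorem pvA_closed (id : Int) (h : 1 ≤ id) :
    calculateParentById id
      = (List.range (PySem.Int.bitLength id)).map (fun k : Nat => id >>> k) := by
  by_cases h1 : id = 1
  · subst h1
    rw [calculateParentById]
    have hb : PySem.Int.bitLength 1 = 1 := rfl
    rw [hb]
    norm_num [List.range_succ]
  · have h2 : 2 ≤ id := by omega
    have h0 : ¬ id ≤ 0 := by omega
    have hd := PySem.Int.floordiv_eq_ediv_of_pos (a := id) (b := 2) (by omega)
    rw [calculateParentById]
    simp only [h1, h0, ne_eq, not_false_iff, if_true, dif_neg]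
    rw [hd, pvA_closed (id / 2) (by omega), pvBitLength_step id h2,
        List.range_succ_eq_map, List.map_cons, List.map_map]
    congr 1
    · rw [Int.shiftRight_eq_div_pow]; simp
    · apply List.map_congr_left
      intro k _
      simp only [Function.comp_apply, Nat.succ_eq_add_one,
        Int.shiftRight_eq_div_pow]
      push_cast
      rw [Int.ediv_ediv_of_nonneg (by norm_num)]
      ring_nf
termination_by id.toNat
decreasing_by
  have := PySem.Int.floordiv_eq_ediv_of_pos (a := id) (b := 2) (by omega)
  omega

-- ===== VERDICT (by name: the statement is the Claim_ definition above) =====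
theorem calculateParentById_spec : Claim_equal_calculateParentById := by
  intro id _ hpre
  unfold Spec_calculateParentById calculateParentById_alt
  rw [pvA_closed id hpre, PySem.List.pyRange_one, List.map_map]
  apply List.map_congr_left
  intro k _
  simp only [Function.comp_apply, zero_add, Int.toNat_natCast]
  exact (Int.shiftRight_natCast_right id k).symm
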